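-- pv_equiv track=rewrite | github.com/RitchieFu/BlocksWorldAStar | test.py | heuristic_h1_enhanced
-- ===== SOURCE A (Python) =====
-- from typing import Tuple, List, Optional
-- from typing import List, Tuple
--
-- def get_support(state: Tuple[Tuple[int, ...], ...], block: int) -> str:
--     """
--     Returns the block that is directly below the given block in the state.
--     If the block is on the table, returns 'Table'.
--     """
--     for stack in state:
--         for i, b in enumerate(stack):
--             if b == block:
--                 if i == 0:
--                     return 'Table'
--                 else:
--                     return str(stack[i - 1])
--     return 'Table'  # If block not found, assume it's on the table
--
-- def heuristic_h1_enhanced(current_state: Tuple[Tuple[int, ...], ...],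
--                           goal_state: Tuple[Tuple[int, ...], ...],
--                           blocks: Tuple[int, ...]) -> int:
--     """
--     Enhanced heuristic that considers misplaced blocks and dependencies.
--     """
--     misplaced = 0
--     for block in blocks:
--         current_support = get_support(current_state, block)
--         goal_support = get_support(goal_state, block)
--         if current_support != goal_support:
--             misplaced += 1
--             # Check if any block is on top of this block
--             for stack in current_state:
--                 if block in stack:
--                     index = stack.index(block)
--                     if index < len(stack) - 1:
--                         # Blocks above this block are blocking it
--                         misplaced += len(stack) - index - 1
--                     break
--     return misplaced
-- ===== SOURCE B (Python) =====
-- def heuristic_h1_enhanced(current_state, goal_state, blocks):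
--     def index_state(state):
--         sup = {}
--         above = {}
--         for stack in state:
--             n = len(stack)
--             for i, b in enumerate(stack):
--                 if b not in sup:
--                     sup[b] = 'Table' if i == 0 else str(stack[i - 1])
--                     above[b] = n - i - 1
--         return sup, above
--
--     cur_sup, cur_above = index_state(current_state)
--     goal_sup, _ = index_state(goal_state)
--     total = 0
--     for b in blocks:
--         if cur_sup.get(b, 'Table') != goal_sup.get(b, 'Table'):
--             total += 1 + cur_above.get(b, 0)
--     return total
-- ===== Notes on version B (the rewrite author's own statement) =====
-- stated objective: faster
-- what changed: B indexes each state once into support/above-count dicts (first occurrence wins) and then answers each block by O(1) lookups, instead of A's per-block rescans of both states.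
import Mathlib
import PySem

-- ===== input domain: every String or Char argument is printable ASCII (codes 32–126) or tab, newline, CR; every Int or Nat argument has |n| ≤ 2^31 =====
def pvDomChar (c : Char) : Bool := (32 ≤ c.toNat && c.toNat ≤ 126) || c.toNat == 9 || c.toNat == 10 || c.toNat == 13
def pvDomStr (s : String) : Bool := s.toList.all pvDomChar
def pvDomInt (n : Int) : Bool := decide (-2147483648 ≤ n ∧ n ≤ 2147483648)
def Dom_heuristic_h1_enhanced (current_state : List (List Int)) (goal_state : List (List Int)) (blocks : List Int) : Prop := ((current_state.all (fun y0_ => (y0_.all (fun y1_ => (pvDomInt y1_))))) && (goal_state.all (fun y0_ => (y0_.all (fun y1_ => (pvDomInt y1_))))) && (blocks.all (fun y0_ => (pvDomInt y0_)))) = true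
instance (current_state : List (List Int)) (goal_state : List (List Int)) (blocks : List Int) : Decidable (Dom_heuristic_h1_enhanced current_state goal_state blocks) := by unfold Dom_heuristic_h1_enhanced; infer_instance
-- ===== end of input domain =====

-- B replaces A's per-block rescans of both states by two dictionaries (first-occurrence support and
-- above-count) built in one pass over each state; objective: faster (asymptotic, O(B+S) vs O(B*S)).


-- ===== PORT A =====
-- inner 'for i, b in enumerate(stack): if b == block: return …' of get_support
def gsStack (stack : List Int) (block : Int) : List (Int × Int) → Option String
  | [] => none
  | (i, b) :: rest =>
    if b = block then
      some (if i = 0 then "Table" else PySem.Int.toStr (PySem.List.pyGetD stack (i - 1) 0))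
    else gsStack stack block rest

def get_support (state : List (List Int)) (block : Int) : String :=
  match state with
  | [] => "Table"
  | stack :: rest =>
    match gsStack stack block (PySem.List.enumerate stack 0) with
    | some s => s
    | none => get_support rest block

-- inner 'for stack in current_state: if block in stack: …; break' of A
def blockingAdd (state : List (List Int)) (block : Int) : Int :=
  match state with
  | [] => 0
  | stack :: rest =>
    if block ∈ stack then
      match PySem.List.index? stack block with
      | some idx =>
        if (idx : Int) < (stack.length : Int) - 1 then (stack.length : Int) - idx - 1 else 0
      | none => 0
    else blockingAdd rest block

def heuristic_h1_enhanced (current_state : List (List Int)) (goal_state : List (List Int)) (blocks : List Int) : Int :=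
  blocks.foldl (fun misplaced block =>
    let current_support := get_support current_state block
    let goal_support := get_support goal_state block
    if current_support ≠ goal_support then
      misplaced + 1 + blockingAdd current_state block
    else misplaced) 0

-- ===== PORT B =====
-- the body of Source B's inner 'for i, b in enumerate(stack)' loop, named so the proofs can refer to it
def bStep (stack : List Int) (acc2 : PySem.Dict Int String × PySem.Dict Int Int) (p : Int × Int) :
    PySem.Dict Int String × PySem.Dict Int Int :=
  if acc2.1.contains p.2 then acc2
  else (acc2.1.insert p.2 (if p.1 = 0 then "Table" else PySem.Int.toStr (PySem.List.pyGetD stack (p.1 - 1) 0)),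
        acc2.2.insert p.2 ((stack.length : Int) - p.1 - 1))

-- index_state of Source B: one pass building the support dict and the above-count dict
def indexState (state : List (List Int)) : PySem.Dict Int String × PySem.Dict Int Int :=
  state.foldl (fun acc stack => (PySem.List.enumerate stack 0).foldl (bStep stack) acc)
    (PySem.Dict.empty, PySem.Dict.empty)

def heuristic_h1_enhanced_alt (current_state : List (List Int)) (goal_state : List (List Int)) (blocks : List Int) : Int :=
  let cur := indexState current_state
  let goal_sup := (indexState goal_state).1
  blocks.foldl (fun total b =>
    if cur.1.getD b "Table" ≠ goal_sup.getD b "Table" then total + 1 + cur.2.getD b 0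
    else total) 0

-- ===== PRECONDITION & SPEC =====
def Spec_heuristic_h1_enhanced (current_state : List (List Int)) (goal_state : List (List Int)) (blocks : List Int) (out : Int) : Prop := out = heuristic_h1_enhanced_alt current_state goal_state blocks
instance (current_state : List (List Int)) (goal_state : List (List Int)) (blocks : List Int) (out : Int) : Decidable (Spec_heuristic_h1_enhanced current_state goal_state blocks out) := by unfold Spec_heuristic_h1_enhanced; infer_instance

-- ===== CLAIM (what is proved, stated in full; the proofs are below) =====
def Claim_equal_heuristic_h1_enhanced : Prop := ∀ (current_state : List (List Int)) (goal_state : List (List Int)) (blocks : List Int), Dom_heuristic_h1_enhanced current_state goal_state blocks → Spec_heuristic_h1_enhanced current_state goal_state blocks (heuristic_h1_enhanced current_state goal_state blocks)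

-- ===== LEMMAS AND PROOFS =====

-- first-occurrence "above count" of a single stack, mirroring gsStack
def abStack (stack : List Int) (block : Int) : List (Int × Int) → Option Int
  | [] => none
  | (i, b) :: rest =>
    if b = block then some ((stack.length : Int) - i - 1)
    else abStack stack block rest

-- first-occurrence support / above-count across the whole state, as Options
def gsOpt (state : List (List Int)) (block : Int) : Option String :=
  match state with
  | [] => none
  | stack :: rest => (gsStack stack block (PySem.List.enumerate stack 0)).or (gsOpt rest block)

def abOpt (state : List (List Int)) (block : Int) : Option Int :=
  match state with
  | [] => none
  | stack :: rest => (abStack stack block (PySem.List.enumerate stack 0)).or (abOpt rest block)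

theorem gsStack_enum (stack : List Int) (block : Int) :
    ∀ (l : List Int) (s : Int), gsStack stack block (PySem.List.enumerate l s)
      = (PySem.List.index? l block).map
          (fun (k : Nat) => if s + (k : Int) = 0 then "Table" else PySem.Int.toStr (PySem.List.pyGetD stack (s + (k : Int) - 1) 0)) := by
  intro l
  induction l with
  | nil => intro s; simp [PySem.List.enumerate_nil, gsStack]
  | cons x xs ih =>
    intro s
    rw [PySem.List.enumerate_cons]
    by_cases h : x = block
    · subst h
      rw [PySem.List.index?_cons_self]
      simp [gsStack]
    · rw [PySem.List.index?_cons_of_ne xs h]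
      simp only [gsStack, if_neg h, ih (s + 1), Option.map_map]
      cases PySem.List.index? xs block with
      | none => simp
      | some k =>
        simp only [Option.map_some, Function.comp_apply, Option.some.injEq]
        push_cast
        rw [show s + 1 + (k : Int) = s + ((k : Int) + 1) from by ring]

theorem abStack_enum (stack : List Int) (block : Int) :
    ∀ (l : List Int) (s : Int), abStack stack block (PySem.List.enumerate l s)
      = (PySem.List.index? l block).map (fun (k : Nat) => (stack.length : Int) - (s + (k : Int)) - 1) := by
  intro l
  induction l with
  | nil => intro s; simp [PySem.List.enumerate_nil, abStack]
  | cons x xs ih =>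
    intro s
    rw [PySem.List.enumerate_cons]
    by_cases h : x = block
    · subst h
      rw [PySem.List.index?_cons_self]
      simp [abStack]
    · rw [PySem.List.index?_cons_of_ne xs h]
      simp only [abStack, if_neg h, ih (s + 1), Option.map_map]
      cases PySem.List.index? xs block with
      | none => simp
      | some k =>
        simp only [Option.map_some, Function.comp_apply, Option.some.injEq]
        push_cast
        omega

theorem get_support_eq (state : List (List Int)) (block : Int) :
    get_support state block = (gsOpt state block).getD "Table" := by
  induction state with
  | nil => simp [get_support, gsOpt]
  | cons stack rest ih =>
    simp only [get_support, gsOpt]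
    cases gsStack stack block (PySem.List.enumerate stack 0) with
    | none => simpa using ih
    | some s => simp

theorem blockingAdd_eq (state : List (List Int)) (block : Int) :
    blockingAdd state block = (abOpt state block).getD 0 := by
  induction state with
  | nil => simp [blockingAdd, abOpt]
  | cons stack rest ih =>
    simp only [blockingAdd, abOpt, abStack_enum]
    by_cases hm : block ∈ stack
    · rw [if_pos hm]
      obtain ⟨k, hk⟩ := Option.isSome_iff_exists.mp ((PySem.List.index?_isSome_iff stack block).mpr hm)
      obtain ⟨hklt, -, -⟩ := PySem.List.getElem_of_index?_eq_some hk
      rw [hk]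
      simp only [Option.map_some, Option.some_or, Option.getD_some]
      have : (k : Int) < (stack.length : Int) := by exact_mod_cast hklt
      split_ifs <;> omega
    · rw [if_neg hm]
      have : PySem.List.index? stack block = none := (PySem.List.index?_eq_none_iff stack block).mpr hm
      rw [this]
      simpa using ih

theorem inner_fold_get? (stack : List Int) (block : Int) :
    ∀ (ps : List (Int × Int)) (sup : PySem.Dict Int String) (ab : PySem.Dict Int Int),
      ((ps.foldl (bStep stack) (sup, ab)).1.get? block = (sup.get? block).or (gsStack stack block ps)) ∧
      ((ps.foldl (bStep stack) (sup, ab)).2.get? block =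
        if (sup.get? block).isSome then ab.get? block
        else (abStack stack block ps).or (ab.get? block)) := by
  intro ps
  induction ps with
  | nil =>
    intro sup ab
    constructor
    · simp [gsStack]
    · simp [abStack]
  | cons p rest ih =>
    intro sup ab
    rcases p with ⟨i, b⟩
    simp only [List.foldl_cons]
    by_cases hc : sup.contains b
    · have hstep : bStep stack (sup, ab) (i, b) = (sup, ab) := by
        simp [bStep, hc]
      rw [hstep]
      rcases ih sup ab with ⟨ih1, ih2⟩
      by_cases hb : b = block
      · subst hb
        have hs : (sup.get? b).isSome := by
          rw [Option.isSome_iff_ne_none]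
          intro h0
          rw [PySem.Dict.get?_eq_none_iff_contains] at h0
          simp [hc] at h0
        obtain ⟨v, hv⟩ := Option.isSome_iff_exists.mp hs
        constructor
        · rw [ih1, hv]; simp [gsStack]
        · rw [ih2, hv]; simp
      · constructor
        · rw [ih1]
          simp [gsStack, hb]
        · rw [ih2]
          simp [abStack, hb]
    · have hstep : bStep stack (sup, ab) (i, b) =
        (sup.insert b (if i = 0 then "Table" else PySem.Int.toStr (PySem.List.pyGetD stack (i - 1) 0)),
         ab.insert b ((stack.length : Int) - i - 1)) := by
        simp [bStep, hc]
      rw [hstep]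
      rcases ih (sup.insert b (if i = 0 then "Table" else PySem.Int.toStr (PySem.List.pyGetD stack (i - 1) 0)))
        (ab.insert b ((stack.length : Int) - i - 1)) with ⟨ih1, ih2⟩
      have hnone : sup.get? b = none := by
        cases h : sup.get? b with
        | none => rfl
        | some v =>
          exfalso; apply hc
          have := (PySem.Dict.get?_eq_none_iff_contains sup b)
          cases hcb : sup.contains b with
          | true => rfl
          | false => rw [this.mpr hcb] at h; cases h
      by_cases hb : b = block
      · subst hb
        constructor
        · rw [ih1, PySem.Dict.get?_insert_self, hnone]
          simp [gsStack]
        · rw [ih2, PySem.Dict.get?_insert_self, hnone]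
          simp [abStack, PySem.Dict.get?_insert_self]
      · constructor
        · rw [ih1, PySem.Dict.get?_insert_of_ne _ _ (Ne.symm hb)]
          simp [gsStack, hb]
        · rw [ih2, PySem.Dict.get?_insert_of_ne _ _ (Ne.symm hb),
              PySem.Dict.get?_insert_of_ne _ _ (Ne.symm hb)]
          simp [abStack, hb]

theorem outer_fold_get? (block : Int) :
    ∀ (state : List (List Int)) (sup : PySem.Dict Int String) (ab : PySem.Dict Int Int),
      ((state.foldl (fun acc stack => (PySem.List.enumerate stack 0).foldl (bStep stack) acc) (sup, ab)).1.get? block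
        = (sup.get? block).or (gsOpt state block)) ∧
      ((state.foldl (fun acc stack => (PySem.List.enumerate stack 0).foldl (bStep stack) acc) (sup, ab)).2.get? block
        = if (sup.get? block).isSome then ab.get? block
          else (abOpt state block).or (ab.get? block)) := by
  intro state
  induction state with
  | nil =>
    intro sup ab
    constructor
    · simp [gsOpt]
    · simp [abOpt]
  | cons stack rest ih =>
    intro sup ab
    simp only [List.foldl_cons, gsOpt, abOpt]
    have hinner := inner_fold_get? stack block (PySem.List.enumerate stack 0) sup ab
    set mid := (PySem.List.enumerate stack 0).foldl (bStep stack) (sup, ab) with hmid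
    have hrest := ih mid.1 mid.2
    rcases hinner with ⟨hin1, hin2⟩
    -- key: gsStack isSome ↔ abStack isSome (both = index? isSome)
    have hsame : (gsStack stack block (PySem.List.enumerate stack 0)).isSome
        = (abStack stack block (PySem.List.enumerate stack 0)).isSome := by
      rw [gsStack_enum, abStack_enum]; simp
    constructor
    · rw [hrest.1, hin1, Option.or_assoc]
    · rw [hrest.2, hin1, hin2]
      cases hsup : sup.get? block with
      | some v => simp
      | none =>
        simp only [Option.none_or, Option.isSome_none, Bool.false_eq_true, if_false]
        cases hgs : gsStack stack block (PySem.List.enumerate stack 0) with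
        | none =>
          have : abStack stack block (PySem.List.enumerate stack 0) = none := by
            rw [hgs] at hsame
            simpa using hsame.symm
          simp [this]
        | some v =>
          have : (abStack stack block (PySem.List.enumerate stack 0)).isSome := by
            rw [hgs] at hsame; simpa using hsame.symm
          obtain ⟨w, hw⟩ := Option.isSome_iff_exists.mp this
          simp [hw]

theorem indexState_sup (state : List (List Int)) (block : Int) :
    (indexState state).1.getD block "Table" = get_support state block := by
  have h := (outer_fold_get? block state PySem.Dict.empty PySem.Dict.empty).1
  rw [get_support_eq, PySem.Dict.getD_eq_get?_getD]
  unfold indexState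
  rw [h]
  simp [PySem.Dict.get?_empty]

theorem indexState_ab (state : List (List Int)) (block : Int) :
    (indexState state).2.getD block 0 = blockingAdd state block := by
  have h := (outer_fold_get? block state PySem.Dict.empty PySem.Dict.empty).2
  rw [blockingAdd_eq, PySem.Dict.getD_eq_get?_getD]
  unfold indexState
  rw [h]
  simp [PySem.Dict.get?_empty]

-- ===== VERDICT (by name: the statement is the Claim_ definition above) =====
theorem heuristic_h1_enhanced_spec : Claim_equal_heuristic_h1_enhanced := by
  intro current_state goal_state blocks _
  unfold Spec_heuristic_h1_enhanced heuristic_h1_enhanced heuristic_h1_enhanced_alt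
  apply List.foldl_ext
  intro acc b _
  rw [indexState_sup, indexState_sup, indexState_ab]
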